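-- pv_equiv track=rewrite | github.com/sebastianruder/NLP-progress | structured/export.py | extract_dataset_desc_and_sota_table
-- ===== SOURCE A (Python) =====
-- from typing import Dict, Tuple, List
--
-- def extract_dataset_desc_and_sota_table(md_lines:List[str]) -> Tuple:
--     """
--     Extract the lines that are the description and lines that are the sota table(s)
--
--     :param md_lines: a list of lines in this section
--     :return:
--     """
--
--     # Main assumption is that the Sota table will minimally have a "Model" column
--     desc = []
--     tables = []
--     t = None
--     in_table = False
--     for l in md_lines:
--         if l.startswith("|") and "model" in l.lower() and not in_table:
--             t = [l]
--             in_table = True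
--         elif in_table and l.startswith("|"):
--             t.append(l)
--         elif in_table and not l.startswith("|"):
--             if t is not None:
--                 tables.append(t)
--             t = None
--             desc.append(l)
--             in_table = False
--         else:
--             desc.append(l)
--
--     if t is not None:
--         tables.append(t)
--
--     return desc, tables
-- ===== SOURCE B (Python) =====
-- def extract_dataset_desc_and_sota_table(md_lines):
--     """Index-driven block consumer: a table-start line opens an inner loop that
--     consumes the whole '|' block; everything else is description."""
--     desc = []
--     tables = []
--     i = 0
--     n = len(md_lines)
--     while i < n:
--         l = md_lines[i]
--         if l.startswith("|") and "model" in l.lower():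
--             t = [l]
--             i += 1
--             while i < n and md_lines[i].startswith("|"):
--                 t.append(md_lines[i])
--                 i += 1
--             tables.append(t)
--         else:
--             desc.append(l)
--             i += 1
--     return desc, tables
-- ===== Notes on version B (the rewrite author's own statement) =====
-- stated objective: alternative
-- what changed: Replaced the in_table flag/optional-accumulator state machine (with a post-loop flush) by an index-driven block consumer: a table-start line triggers an inner loop that consumes the whole '|' block at once, so no flag and no trailing flush are needed.
import Mathlib
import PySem

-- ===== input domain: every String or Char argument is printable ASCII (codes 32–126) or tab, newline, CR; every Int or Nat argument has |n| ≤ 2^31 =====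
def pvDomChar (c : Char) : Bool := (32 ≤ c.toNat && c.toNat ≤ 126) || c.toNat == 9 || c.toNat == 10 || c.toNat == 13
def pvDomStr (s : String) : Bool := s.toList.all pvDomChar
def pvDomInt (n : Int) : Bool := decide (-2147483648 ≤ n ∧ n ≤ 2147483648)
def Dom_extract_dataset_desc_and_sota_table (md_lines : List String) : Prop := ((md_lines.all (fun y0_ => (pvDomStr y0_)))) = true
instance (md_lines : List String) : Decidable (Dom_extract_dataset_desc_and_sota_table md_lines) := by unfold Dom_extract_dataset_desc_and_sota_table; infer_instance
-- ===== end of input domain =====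

-- B replaces A's in_table flag state machine (with post-loop flush) by a nested-loop
-- block consumer that swallows each '|' table block in one inner pass; same cost, no flag.

-- ===== PORT A =====
-- state: ((desc, tables), t, in_table); t = none plays Python's `t = None`.
def extractStepA (st : (List String × List (List String)) × Option (List String) × Bool)
    (l : String) : (List String × List (List String)) × Option (List String) × Bool :=
  let desc := st.1.1
  let tables := st.1.2
  let t := st.2.1
  let in_table := st.2.2
  if PySem.Str.startswith l "|" && PySem.Str.isIn "model" (PySem.Str.lower l) && !in_table then
    ((desc, tables), some [l], true)
  else if in_table && PySem.Str.startswith l "|" then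
    -- t.append(l): in this branch Python's t is a list (in_table = true); none is unreachable
    ((desc, tables), (match t with | some tt => some (tt ++ [l]) | none => none), true)
  else if in_table && !(PySem.Str.startswith l "|") then
    ((desc ++ [l], match t with | some tt => tables ++ [tt] | none => tables), none, false)
  else
    ((desc ++ [l], tables), t, in_table)

def extract_dataset_desc_and_sota_table (md_lines : List String) : List String × List (List String) :=
  let st := md_lines.foldl extractStepA (([], []), none, false)
  -- trailing `if t is not None: tables.append(t)`
  (st.1.1, match st.2.1 with | some tt => st.1.2 ++ [tt] | none => st.1.2)

-- ===== PORT B =====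
-- inner `while i < n and md_lines[i].startswith("|")` loop: returns (block, rest)
def altTakeBar : List String → List String × List String
  | [] => ([], [])
  | l :: ls =>
    if PySem.Str.startswith l "|" then
      let p := altTakeBar ls
      (l :: p.1, p.2)
    else ([], l :: ls)

-- termination helper for the outer loop (cited by name in decreasing_by)
theorem altTakeBar_snd_length_le : ∀ ls : List String, (altTakeBar ls).2.length ≤ ls.length := by
  intro ls
  induction ls with
  | nil => simp [altTakeBar]
  | cons l ls ih =>
    simp only [altTakeBar]
    split
    · simpa using Nat.le_succ_of_le ih
    · simp

-- outer `while i < n` loop over the remaining lines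
def altGo : List String → List String × List (List String)
  | [] => ([], [])
  | l :: ls =>
    if PySem.Str.startswith l "|" && PySem.Str.isIn "model" (PySem.Str.lower l) then
      let p := altTakeBar ls
      let q := altGo p.2
      (q.1, (l :: p.1) :: q.2)
    else
      let q := altGo ls
      (l :: q.1, q.2)
termination_by ls => ls.length
decreasing_by
  · exact Nat.lt_succ_of_le (altTakeBar_snd_length_le ls)
  · exact Nat.lt_succ_self _

def extract_dataset_desc_and_sota_table_alt (md_lines : List String) : List String × List (List String) :=
  altGo md_lines

-- ===== PRECONDITION & SPEC =====
def Spec_extract_dataset_desc_and_sota_table (md_lines : List String) (out : List String × List (List String)) : Prop := out = extract_dataset_desc_and_sota_table_alt md_lines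
instance (md_lines : List String) (out : List String × List (List String)) : Decidable (Spec_extract_dataset_desc_and_sota_table md_lines out) := by unfold Spec_extract_dataset_desc_and_sota_table; infer_instance

-- ===== CLAIM (what is proved, stated in full; the proofs are below) =====
def Claim_equal_extract_dataset_desc_and_sota_table : Prop := ∀ (md_lines : List String), Dom_extract_dataset_desc_and_sota_table md_lines → Spec_extract_dataset_desc_and_sota_table md_lines (extract_dataset_desc_and_sota_table md_lines)

-- ===== LEMMAS AND PROOFS =====

-- the head of altTakeBar's remainder never starts with "|"
theorem altTakeBar_snd_head : ∀ (ls : List String) (r : String) (rs : List String),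
    (altTakeBar ls).2 = r :: rs → PySem.Str.startswith r "|" = false := by
  intro ls
  induction ls with
  | nil => intro r rs h; simp [altTakeBar] at h
  | cons l ls ih =>
    intro r rs h
    simp only [altTakeBar] at h
    split at h
    · exact ih r rs h
    · rename_i hl
      obtain ⟨rfl, rfl⟩ := by simpa using h
      simpa using hl

-- the flush applied after A's loop
def flushA (st : (List String × List (List String)) × Option (List String) × Bool) :
    List String × List (List String) :=
  (st.1.1, match st.2.1 with | some tt => st.1.2 ++ [tt] | none => st.1.2)

-- A's fold from an in-table state runs exactly over the '|' block altTakeBar consumes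
theorem foldA_inTable : ∀ (ls t desc : List String) (tables : List (List String)),
    List.foldl extractStepA ((desc, tables), some t, true) ls =
      (match (altTakeBar ls).2 with
       | [] => ((desc, tables), some (t ++ (altTakeBar ls).1), true)
       | r :: rs => List.foldl extractStepA ((desc ++ [r], tables ++ [t ++ (altTakeBar ls).1]), none, false) rs) := by
  intro ls
  induction ls with
  | nil => intro t desc tables; simp [altTakeBar]
  | cons l ls ih =>
    intro t desc tables
    by_cases hl : PySem.Chars.startswith l.toList ['|'] = true
    · have hstep : extractStepA ((desc, tables), some t, true) l
          = ((desc, tables), some (t ++ [l]), true) := by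
        simp [extractStepA, hl]
      rw [List.foldl_cons, hstep, ih (t ++ [l]) desc tables]
      rcases hsnd : (altTakeBar ls).2 with _ | ⟨r, rs⟩ <;>
        simp [altTakeBar, hl, hsnd]
    · have hstep : extractStepA ((desc, tables), some t, true) l
          = ((desc ++ [l], tables ++ [t]), none, false) := by
        simp [extractStepA, hl]
      rw [List.foldl_cons, hstep]
      simp [altTakeBar, hl]

-- main invariant: from an out-of-table state, A's flushed fold is B's altGo (appended)
theorem foldA_outTable : ∀ (n : Nat) (ls : List String), ls.length ≤ n →
    ∀ (desc : List String) (tables : List (List String)),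
      flushA (List.foldl extractStepA ((desc, tables), none, false) ls)
        = (desc ++ (altGo ls).1, tables ++ (altGo ls).2) := by
  intro n
  induction n with
  | zero =>
    intro ls hls desc tables
    have : ls = [] := List.eq_nil_of_length_eq_zero (Nat.le_zero.mp hls)
    subst this
    simp [flushA, altGo]
  | succ n ih =>
    intro ls hls desc tables
    cases ls with
    | nil => simp [flushA, altGo]
    | cons l ls =>
      have hlen : ls.length ≤ n := Nat.lt_succ_iff.mp (by simpa using hls)
      by_cases hc1 : PySem.Chars.startswith l.toList ['|'] = true
      · by_cases hc2 : PySem.Chars.isIn ['m', 'o', 'd', 'e', 'l'] (PySem.Chars.lower l.toList) = true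
        · -- table start
          have hstep : extractStepA ((desc, tables), none, false) l
              = ((desc, tables), some [l], true) := by
            simp [extractStepA, hc1, hc2]
          rw [List.foldl_cons, hstep, foldA_inTable ls [l] desc tables]
          rcases hsnd : (altTakeBar ls).2 with _ | ⟨r, rs⟩
          · rw [altGo]
            simp [flushA, hc1, hc2, hsnd, altGo]
          · have hrs : rs.length ≤ n := by
              have h1 := altTakeBar_snd_length_le ls
              rw [hsnd] at h1
              simp at h1
              omega
            rw [ih rs hrs (desc ++ [r]) (tables ++ [[l] ++ (altTakeBar ls).1])]
            have hr : PySem.Chars.startswith r.toList ['|'] = false := by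
              simpa using altTakeBar_snd_head ls r rs hsnd
            have hgo : altGo (l :: ls)
                = (r :: (altGo rs).1, ([l] ++ (altTakeBar ls).1) :: (altGo rs).2) := by
              rw [altGo]
              simp only [hsnd]
              rw [altGo]
              simp [hc1, hc2, hr]
            rw [hgo]
            simp
        · -- '|' line without "model" outside a table: description
          have hstep : extractStepA ((desc, tables), none, false) l
              = ((desc ++ [l], tables), none, false) := by
            simp [extractStepA, hc1, hc2]
          rw [List.foldl_cons, hstep, ih ls hlen (desc ++ [l]) tables]
          have hgo : altGo (l :: ls) = (l :: (altGo ls).1, (altGo ls).2) := by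
            rw [altGo]; simp [hc2]
          rw [hgo]
          simp
      · -- non-'|' line outside a table: description
        have hstep : extractStepA ((desc, tables), none, false) l
            = ((desc ++ [l], tables), none, false) := by
          simp [extractStepA, hc1]
        rw [List.foldl_cons, hstep, ih ls hlen (desc ++ [l]) tables]
        have hgo : altGo (l :: ls) = (l :: (altGo ls).1, (altGo ls).2) := by
          rw [altGo]; simp [hc1]
        rw [hgo]
        simp

-- ===== VERDICT (by name: the statement is the Claim_ definition above) =====
theorem extract_dataset_desc_and_sota_table_spec : Claim_equal_extract_dataset_desc_and_sota_table := by
  intro md_lines _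
  show extract_dataset_desc_and_sota_table md_lines = extract_dataset_desc_and_sota_table_alt md_lines
  have h := foldA_outTable md_lines.length md_lines (le_refl _) [] []
  simpa [extract_dataset_desc_and_sota_table, extract_dataset_desc_and_sota_table_alt, flushA] using h
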